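-- pv_equiv track=rewrite | github.com/adamghill/dj-angles | src/dj_angles/html.py | get_end_of_attribute_value
-- ===== SOURCE A (Python) =====
-- def get_end_of_attribute_value(html: str, start_idx: int) -> (str, int):
--     starts_with_double_quote = False
--     starts_with_single_quote = False
--     idx = 0
--     value = ""
--
--     for c in html[start_idx:]:
--         if idx == 0 and c == "'":
--             starts_with_single_quote = True
--             idx += 1
--             continue
--         elif idx == 0 and c == '"':
--             starts_with_double_quote = True
--             idx += 1
--             continue
--         elif starts_with_single_quote and c == "'":
--             idx += 1
--             break
--         elif starts_with_double_quote and c == '"':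
--             idx += 1
--             break
--         elif not starts_with_double_quote and not starts_with_single_quote and c == " ":
--             break
--         elif not starts_with_double_quote and not starts_with_single_quote and c == ">":
--             break
--
--         value += c
--         idx += 1
--
--     return (value, start_idx + idx)
-- ===== SOURCE B (Python) =====
-- def get_end_of_attribute_value(html: str, start_idx: int) -> (str, int):
--     s = html[start_idx:]
--     if s[:1] in ("'", '"'):
--         q = s[0]
--         p = s.find(q, 1)
--         if p == -1:
--             return (s[1:], start_idx + len(s))
--         return (s[1:p], start_idx + p + 1)
--     p1 = s.find(" ")
--     p2 = s.find(">")
--     p = p2 if p1 == -1 else (p1 if p2 == -1 else min(p1, p2))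
--     if p == -1:
--         return (s, start_idx + len(s))
--     return (s[:p], start_idx + p)
-- ===== Notes on version B (the rewrite author's own statement) =====
-- stated objective: idiomatic
-- what changed: Replaced the per-character state-machine loop (quote flags, index counter, string accumulator) with branch-then-find-and-slice: detect a leading quote, locate the delimiter with str.find, and return a slice.
import Mathlib
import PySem

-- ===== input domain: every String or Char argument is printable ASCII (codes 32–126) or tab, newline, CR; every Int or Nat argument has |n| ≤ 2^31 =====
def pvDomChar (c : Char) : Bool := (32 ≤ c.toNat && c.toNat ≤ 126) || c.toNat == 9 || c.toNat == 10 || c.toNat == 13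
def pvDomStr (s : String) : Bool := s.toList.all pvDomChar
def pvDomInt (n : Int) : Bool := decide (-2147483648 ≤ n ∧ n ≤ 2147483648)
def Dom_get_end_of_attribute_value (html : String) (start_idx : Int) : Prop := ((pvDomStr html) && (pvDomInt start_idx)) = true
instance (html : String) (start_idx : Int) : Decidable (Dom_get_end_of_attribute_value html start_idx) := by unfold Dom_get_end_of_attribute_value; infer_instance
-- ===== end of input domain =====

-- B replaces A's per-character state-machine loop with branch-then-find-and-slice (idiomatic; same cost).


-- ===== PORT A =====
-- A's for-loop, with the early 'break's returning directly; state = (double-quote flag, single-quote flag, idx, value)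
def pvALoop (chars : List Char) (sdq ssq : Bool) (idx : Int) (value : List Char) : List Char × Int :=
  match chars with
  | [] => (value, idx)
  | c :: rest =>
    if idx = 0 ∧ c = '\'' then pvALoop rest sdq true (idx + 1) value
    else if idx = 0 ∧ c = '"' then pvALoop rest true ssq (idx + 1) value
    else if ssq = true ∧ c = '\'' then (value, idx + 1)
    else if sdq = true ∧ c = '"' then (value, idx + 1)
    else if sdq = false ∧ ssq = false ∧ c = ' ' then (value, idx)
    else if sdq = false ∧ ssq = false ∧ c = '>' then (value, idx)
    else pvALoop rest sdq ssq (idx + 1) (value ++ [c])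

def get_end_of_attribute_value (html : String) (start_idx : Int) : String × Int :=
  let r := pvALoop (PySem.Str.slice html (some start_idx) none).toList false false 0 []
  (String.ofList r.1, start_idx + r.2)

-- ===== PORT B =====
-- the unquoted branch of Source B: p1 = s.find(" "), p2 = s.find(">"), p = earliest hit (Python's -1 convention)
def pvBUnquoted (cs : List Char) (start_idx : Int) : String × Int :=
  let p1 := PySem.Chars.find cs [' ']
  let p2 := PySem.Chars.find cs ['>']
  let p := if p1 = -1 then p2 else if p2 = -1 then p1 else min p1 p2
  if p = -1 then (String.ofList cs, start_idx + cs.length)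
  else (String.ofList (PySem.List.slice cs none (some p)), start_idx + p)

def get_end_of_attribute_value_alt (html : String) (start_idx : Int) : String × Int :=
  let cs := (PySem.Str.slice html (some start_idx) none).toList
  if cs.take 1 = ['\''] ∨ cs.take 1 = ['"'] then          -- s[:1] in ("'", '"')
    let q := cs.headD ' '                                  -- q = s[0]; cs is nonempty here by the guard
    let p := PySem.Chars.findFrom cs [q] 1 none            -- p = s.find(q, 1)
    if p = -1 then (String.ofList (cs.drop 1), start_idx + cs.length)
    else (String.ofList (PySem.List.slice cs (some 1) (some p)), start_idx + p + 1)
  else pvBUnquoted cs start_idx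

-- ===== PRECONDITION & SPEC =====
def Spec_get_end_of_attribute_value (html : String) (start_idx : Int) (out : String × Int) : Prop := out = get_end_of_attribute_value_alt html start_idx
instance (html : String) (start_idx : Int) (out : String × Int) : Decidable (Spec_get_end_of_attribute_value html start_idx out) := by unfold Spec_get_end_of_attribute_value; infer_instance

-- ===== CLAIM (what is proved, stated in full; the proofs are below) =====
def Claim_equal_get_end_of_attribute_value : Prop := ∀ (html : String) (start_idx : Int), Dom_get_end_of_attribute_value html start_idx → Spec_get_end_of_attribute_value html start_idx (get_end_of_attribute_value html start_idx)

-- ===== LEMMAS AND PROOFS =====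

-- Chars.find with a one-character needle is List.findIdx?
theorem pv_go_single (q : Char) (cs : List Char) (k : Nat) :
    PySem.Chars.find.go [q] cs k =
      match cs.findIdx? (· == q) with
      | none => -1
      | some j => ((k : Int) + j) := by
  induction cs generalizing k with
  | nil => simp [PySem.Chars.find.go]
  | cons c t ih =>
    by_cases hc : c = q
    · simp [PySem.Chars.find.go, List.isPrefixOf, hc, List.findIdx?_cons]
    · simp [PySem.Chars.find.go, List.isPrefixOf, hc, List.findIdx?_cons, ih, Ne.symm hc]
      cases t.findIdx? (· == q) <;> simp
      push_cast; ring

theorem pv_find_single (q : Char) (cs : List Char) :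
    PySem.Chars.find cs [q] =
      match cs.findIdx? (· == q) with
      | none => -1
      | some j => (j : Int) := by
  simp [PySem.Chars.find, pv_go_single]

-- s.find(q, 1) on a nonempty string
theorem pv_findFrom_one (q c : Char) (rest : List Char) :
    PySem.Chars.findFrom (c :: rest) [q] 1 none =
      match rest.findIdx? (· == q) with
      | none => -1
      | some j => 1 + (j : Int) := by
  have h : ¬((rest.length : Int) < 0) := by omega
  simp [PySem.Chars.findFrom, pv_find_single, h]
  cases rest.findIdx? (· == q) <;> simp

-- A's loop in quoted mode (flags encode the opening quote q, idx >= 1): value grows until the matching quote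
theorem pv_quoted (q : Char) (hq : q = '\'' ∨ q = '"') (rest acc : List Char) (n : Int) (hn : 1 ≤ n) :
    pvALoop rest (q == '"') (q == '\'') n acc =
      match rest.findIdx? (· == q) with
      | none => (acc ++ rest, n + rest.length)
      | some j => (acc ++ rest.take j, n + j + 1) := by
  induction rest generalizing n acc with
  | nil => simp [pvALoop]
  | cons c t ih =>
    have hn0 : ¬ (n = 0) := by omega
    by_cases hc : c = q
    · rcases hq with hq | hq <;>
        simp [pvALoop, hn0, hq, hc, List.findIdx?_cons]
    · have ih' := ih (acc ++ [c]) (n + 1) (by omega)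
      rcases hq with hq | hq
      · subst hq
        simp at ih'
        simp [pvALoop, hn0, hc, List.findIdx?_cons, ih']
        cases t.findIdx? (fun x => x == '\'') <;> simp [List.take_cons] <;> push_cast <;> ring
      · subst hq
        simp at ih'
        simp [pvALoop, hn0, hc, List.findIdx?_cons, ih']
        cases t.findIdx? (fun x => x == '"') <;> simp [List.take_cons] <;> push_cast <;> ring

-- A's loop in unquoted mode (both flags false, idx >= 1): value grows until a space or '>'
theorem pv_unquoted (rest acc : List Char) (n : Int) (hn : 1 ≤ n) :
    pvALoop rest false false n acc =
      match rest.findIdx? (fun c => c == ' ' || c == '>') with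
      | none => (acc ++ rest, n + rest.length)
      | some j => (acc ++ rest.take j, n + j) := by
  induction rest generalizing n acc with
  | nil => simp [pvALoop]
  | cons c t ih =>
    have hn0 : ¬ (n = 0) := by omega
    by_cases hsp : c = ' '
    · simp [pvALoop, hn0, hsp, List.findIdx?_cons]
    · by_cases hgt : c = '>'
      · simp [pvALoop, hn0, hgt, List.findIdx?_cons]
      · have ih' := ih (acc ++ [c]) (n + 1) (by omega)
        simp [pvALoop, hn0, hsp, hgt, List.findIdx?_cons, ih']
        cases t.findIdx? (fun c => c == ' ' || c == '>') <;> simp <;> push_cast <;> ring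

-- first index satisfying a disjunction = earliest of the two first indices
theorem pv_or (p q : Char → Bool) (cs : List Char) :
    cs.findIdx? (fun c => p c || q c) =
      match cs.findIdx? p, cs.findIdx? q with
      | none, b => b
      | some i, none => some i
      | some i, some j => some (min i j) := by
  induction cs with
  | nil => simp
  | cons c t ih =>
    by_cases hp : p c
    · by_cases hq : q c
      · simp [List.findIdx?_cons, hp, hq]
      · simp [List.findIdx?_cons, hp, hq]
        cases t.findIdx? q <;> simp
    · by_cases hq : q c
      · simp [List.findIdx?_cons, hp, hq]
        cases t.findIdx? p <;> simp
      · simp [List.findIdx?_cons, hp, hq, ih]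
        cases t.findIdx? p <;> cases t.findIdx? q <;> simp <;> omega

-- Source B's min-of-two-finds equals the first space-or-'>' index
theorem pv_comb (cs : List Char) :
    (if PySem.Chars.find cs [' '] = -1 then PySem.Chars.find cs ['>']
     else if PySem.Chars.find cs ['>'] = -1 then PySem.Chars.find cs [' ']
     else min (PySem.Chars.find cs [' ']) (PySem.Chars.find cs ['>'])) =
      match cs.findIdx? (fun c => c == ' ' || c == '>') with
      | none => -1
      | some j => (j : Int) := by
  rw [pv_find_single, pv_find_single, pv_or]
  cases cs.findIdx? (· == ' ') <;> cases cs.findIdx? (· == '>') <;> simp <;> omega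

-- the two ports agree on the character list of html[start_idx:]
theorem pv_core (cs : List Char) (start_idx : Int) :
    (String.ofList (pvALoop cs false false 0 []).1, start_idx + (pvALoop cs false false 0 []).2) =
      (if cs.take 1 = ['\''] ∨ cs.take 1 = ['"'] then
        let q := cs.headD ' '
        let p := PySem.Chars.findFrom cs [q] 1 none
        if p = -1 then (String.ofList (cs.drop 1), start_idx + cs.length)
        else (String.ofList (PySem.List.slice cs (some 1) (some p)), start_idx + p + 1)
      else pvBUnquoted cs start_idx) := by
  match cs with
  | [] =>
    simp [pvALoop, pvBUnquoted, pv_find_single]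
  | c :: t =>
    by_cases hq : c = '\'' ∨ c = '"'
    · have hguard : (c :: t).take 1 = ['\''] ∨ (c :: t).take 1 = ['"'] := by
        rcases hq with h | h <;> simp [h]
      rw [if_pos hguard]
      have hA : pvALoop (c :: t) false false 0 [] = pvALoop t (c == '"') (c == '\'') 1 [] := by
        rcases hq with h | h <;> simp [pvALoop, h]
      rw [hA, pv_quoted c hq t [] 1 (by omega)]
      simp only [List.headD, pv_findFrom_one]
      cases h : t.findIdx? (· == c) with
      | none => simp; omega
      | some j =>
        have hne : ¬ ((1 : Int) + j = -1) := by omega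
        simp [hne]
        have hsl : PySem.List.slice (c :: t) (some 1) (some (1 + (j:Int))) = t.take j := by
          have := PySem.List.slice_natCast (c :: t) 1 (1 + j)
          push_cast at this
          simpa using this
        rw [hsl]
        exact ⟨rfl, by ring⟩
    · push_neg at hq
      obtain ⟨hq1, hq2⟩ := hq
      have hguard : ¬ ((c :: t).take 1 = ['\''] ∨ (c :: t).take 1 = ['"']) := by
        simp [hq1, hq2]
      rw [if_neg hguard]
      unfold pvBUnquoted
      simp only [pv_comb]
      by_cases hsp : c = ' '
      · simp [pvALoop, hsp, List.findIdx?_cons, PySem.List.slice]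
      · by_cases hgt : c = '>'
        · simp [pvALoop, hgt, List.findIdx?_cons, PySem.List.slice]
        · have hA : pvALoop (c :: t) false false 0 [] = pvALoop t false false 1 [c] := by
            simp [pvALoop, hq1, hq2, hsp, hgt]
          rw [hA, pv_unquoted t [c] 1 (by omega)]
          simp only [List.findIdx?_cons]
          have hc : (c == ' ' || c == '>') = false := by simp [hsp, hgt]
          rw [hc]
          cases h : t.findIdx? (fun c => c == ' ' || c == '>') with
          | none => simp; omega
          | some j =>
            have hne : ¬ (((j:Int) + 1) = -1) := by omega
            simp [hne]
            have hsl : PySem.List.slice (c :: t) none (some ((j:Int) + 1)) = c :: t.take j := by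
              have := PySem.List.slice_to_natCast (c :: t) (j + 1)
              push_cast at this
              simpa using this
            rw [hsl]
            exact ⟨rfl, by ring⟩

-- ===== VERDICT (by name: the statement is the Claim_ definition above) =====
theorem get_end_of_attribute_value_spec : Claim_equal_get_end_of_attribute_value := by
  intro html start_idx _
  unfold Spec_get_end_of_attribute_value get_end_of_attribute_value get_end_of_attribute_value_alt
  exact pv_core _ _
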